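-- pv_equiv track=rewrite | github.com/GoChriNo/aoc2025 | day3/solution.py | get_best_digit
-- ===== SOURCE A (Python) =====
-- def get_best_digit(line, last_digit=False):
--     first_encounter = {}
--     num_batteries = len(line)
--     for i, battery in enumerate(line):
--         if battery not in first_encounter:
--             first_encounter[battery] = i
--
--     for digit in "987654321":
--         if digit not in first_encounter:
--             continue
--         if first_encounter[digit] != num_batteries - 1 or last_digit:
--             return first_encounter[digit]
--     return num_batteries - 1
-- ===== SOURCE B (Python) =====
-- def get_best_digit(line, last_digit=False):
--     haystack = line if last_digit else line[:-1]
--     best = None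
--     best_index = len(line) - 1
--     for i, c in enumerate(haystack):
--         if c in ("1", "2", "3", "4", "5", "6", "7", "8", "9") and (best is None or c > best):
--             best, best_index = c, i
--     return best_index
-- ===== Notes on version B (the rewrite author's own statement) =====
-- stated objective: alternative
-- what changed: Replaces A's build-a-first-occurrence-dict-then-scan-digits-9..1 with a single forward argmax pass over line (or line[:-1] when last_digit is false, which folds A's 'first index != len-1 or last_digit' rule into a slice), keeping the first occurrence of the highest digit seen.
import Mathlib
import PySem

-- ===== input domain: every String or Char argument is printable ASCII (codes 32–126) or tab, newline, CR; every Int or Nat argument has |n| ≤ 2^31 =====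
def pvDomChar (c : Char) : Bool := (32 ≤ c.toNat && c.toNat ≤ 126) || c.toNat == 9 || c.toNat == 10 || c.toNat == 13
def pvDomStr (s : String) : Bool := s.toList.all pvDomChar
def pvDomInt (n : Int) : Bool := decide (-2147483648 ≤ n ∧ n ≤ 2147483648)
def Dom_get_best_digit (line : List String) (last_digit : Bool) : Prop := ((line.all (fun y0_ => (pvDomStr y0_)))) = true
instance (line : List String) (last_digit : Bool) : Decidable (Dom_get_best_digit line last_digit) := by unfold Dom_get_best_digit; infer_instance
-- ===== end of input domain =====

-- B replaces A's first-occurrence dict + descending digit scan by a single forward argmax pass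
-- over line (or line[:-1] when last_digit is false); same O(n) cost, different decomposition.


-- ===== PORT A =====
-- for digit in "987654321" (the digits A scans, as the 1-char strings Python compares)
def aDigits : List String := ["9", "8", "7", "6", "5", "4", "3", "2", "1"]

-- A's second loop: scan digits 9..1, return the first stored index passing the test
def aLoop (fe : PySem.Dict String Int) (n : Int) (last_digit : Bool) : List String → Int
  | [] => n - 1
  | d :: ds =>
    match fe.get? d with
    | none => aLoop fe n last_digit ds
    | some i => if decide (i ≠ n - 1) || last_digit then i else aLoop fe n last_digit ds

def get_best_digit (line : List String) (last_digit : Bool) : Int :=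
  let first_encounter := (PySem.List.enumerate line).foldl
    (fun d p => if d.contains p.2 then d else d.insert p.2 p.1) PySem.Dict.empty
  let num_batteries : Int := line.length
  aLoop first_encounter num_batteries last_digit aDigits

-- ===== PORT B =====
-- the tuple ("1", ..., "9") of Source B
def bDigits : List String := ["1", "2", "3", "4", "5", "6", "7", "8", "9"]

-- Python's '<' on str is lexicographic on code points = List.lt on toList (exact)
def strLt (a b : String) : Bool := decide (a.toList < b.toList)

-- 'best is None or c > best'
def bBetter (best : Option String) (c : String) : Bool :=
  match best with
  | none => true
  | some b => strLt b c

-- one step of Source B's loop body, state = (best, best_index)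
def bStep (st : Option String × Int) (p : Int × String) : Option String × Int :=
  if bDigits.contains p.2 && bBetter st.1 p.2 then (some p.2, p.1) else st

def get_best_digit_alt (line : List String) (last_digit : Bool) : Int :=
  let haystack := if last_digit then line else PySem.List.slice line none (some (-1))
  let r := (PySem.List.enumerate haystack).foldl bStep (none, (line.length : Int) - 1)
  r.2

-- ===== PRECONDITION & SPEC =====
def Spec_get_best_digit (line : List String) (last_digit : Bool) (out : Int) : Prop := out = get_best_digit_alt line last_digit
instance (line : List String) (last_digit : Bool) (out : Int) : Decidable (Spec_get_best_digit line last_digit out) := by unfold Spec_get_best_digit; infer_instance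

-- ===== CLAIM (what is proved, stated in full; the proofs are below) =====
def Claim_equal_get_best_digit : Prop := ∀ (line : List String) (last_digit : Bool), Dom_get_best_digit line last_digit → Spec_get_best_digit line last_digit (get_best_digit line last_digit)

-- ===== LEMMAS AND PROOFS =====

-- common reference value: scan ds in order, return the first index in H of the first d ∈ ds present in H
def specLoop (H : List String) (n : Int) : List String → Int
  | [] => n - 1
  | d :: ds =>
    match PySem.List.index? H d with
    | some j => (j : Int)
    | none => specLoop H n ds

-- A's first loop stores, for each element, its first index
lemma fe_get (l : List String) (s : Int) (d0 : PySem.Dict String Int) (k : String) :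
    ((PySem.List.enumerate l s).foldl
      (fun d p => if d.contains p.2 then d else d.insert p.2 p.1) d0).get? k
    = (d0.get? k).or ((PySem.List.index? l k).map (fun j => s + (j : Int))) := by
  induction l generalizing s d0 with
  | nil => simp [PySem.List.enumerate_nil]
  | cons x xs ih =>
    rw [PySem.List.enumerate_cons, List.foldl_cons, ih]
    by_cases hkx : x = k
    · subst hkx
      rw [PySem.List.index?_cons_self]
      by_cases hc : d0.contains x
      · have hs : (d0.get? x).isSome := by
          rw [← PySem.Dict.contains_eq_isSome_get?]; exact hc
        obtain ⟨v, hv⟩ := Option.isSome_iff_exists.mp hs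
        simp [hc, hv]
      · have hn : d0.get? x = none := by
          rw [PySem.Dict.get?_eq_none_iff_contains]
          simpa using hc
        simp [hc, hn, PySem.Dict.get?_insert_self]
    · rw [PySem.List.index?_cons_of_ne _ hkx]
      by_cases hc : d0.contains x
      · simp only [hc, if_pos]
        cases PySem.List.index? xs k <;> simp <;> ring_nf
      · simp only [hc, Bool.false_eq_true, if_neg, not_false_iff]
        rw [PySem.Dict.get?_insert_of_ne d0 s (Ne.symm hkx)]
        cases PySem.List.index? xs k <;> simp <;> ring_nf

-- A's digit loop equals the reference scan over H = line or line.dropLast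
lemma aLoop_eq (line : List String) (last_digit : Bool) (fe : PySem.Dict String Int)
    (hfe : ∀ k, fe.get? k = (PySem.List.index? line k).map (fun j => (j : Int)))
    (ds : List String) :
    aLoop fe (line.length : Int) last_digit ds
      = specLoop (if last_digit then line else line.dropLast) (line.length : Int) ds := by
  induction ds with
  | nil => rfl
  | cons d rest ih =>
    rw [aLoop, specLoop, hfe d]
    cases hlast : last_digit with
    | true =>
      simp only [hlast] at ih
      simp only [if_pos]
      cases h : PySem.List.index? line d with
      | none => simpa using ih
      | some j => simp
    | false =>
      simp only [hlast, Bool.false_eq_true, if_neg, not_false_iff] at ih ⊢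
      cases hH : PySem.List.index? line.dropLast d with
      | some j =>
        -- d occurs in the prefix at index j < length - 1, so A's test passes with the same index
        have hd : d ∈ line.dropLast := by
          rw [← PySem.List.index?_isSome_iff, hH]; rfl
        have hlt : j < line.dropLast.length := by
          obtain ⟨hk, -, -⟩ := PySem.List.getElem_of_index?_eq_some hH
          exact hk
        have hne : line ≠ [] := by
          intro h0; rw [h0] at hd; simp at hd
        have hline : line.dropLast ++ [line.getLast hne] = line := List.dropLast_append_getLast hne
        have hfull : PySem.List.index? line d = some j := by
          rw [← hline, PySem.List.index?_append_of_mem _ hd, hH]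
        rw [hfull]
        have hlen : line.dropLast.length = line.length - 1 := by simp
        have : (j : Int) ≠ (line.length : Int) - 1 := by
          have h1 : 1 ≤ line.length := by
            cases line with
            | nil => exact absurd rfl hne
            | cons a t => simp
          omega
        simp [this]
      | none =>
        have hd : d ∉ line.dropLast := (PySem.List.index?_eq_none_iff _ _).mp hH
        cases hL : PySem.List.index? line d with
        | none => simpa using ih
        | some i =>
          -- d occurs only at the last position: A's test fails, both sides skip d
          have hne : line ≠ [] := by
            intro h0; rw [h0] at hL; simp [PySem.List.index?] at hL
          obtain ⟨hk, hv, hmin⟩ := PySem.List.getElem_of_index?_eq_some hL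
          have hi : i = line.length - 1 := by
            by_contra hne2
            have hilt : i < line.dropLast.length := by simp; omega
            have : line.dropLast[i] = d := by
              rw [List.getElem_dropLast]; exact hv
            exact hd (this ▸ List.getElem_mem hilt)
          have h1 : 1 ≤ line.length := by
            cases line with
            | nil => exact absurd rfl hne
            | cons a t => simp
          have hieq : (i : Int) = (line.length : Int) - 1 := by omega
          simpa [hieq] using ih

-- closed recursive description of Source B's loop: the winning digit and its index relative to H
def argmax (b : Option String) : List String → Option (String × Nat)
  | [] => none
  | c :: t =>
    if bDigits.contains c && bBetter b c then
      match argmax (some c) t with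
      | some (m, j) => some (m, j + 1)
      | none => some (c, 0)
    else
      match argmax b t with
      | some (m, j) => some (m, j + 1)
      | none => none

lemma foldl_bStep (H : List String) (s : Int) (b : Option String) (bi : Int) :
    (PySem.List.enumerate H s).foldl bStep (b, bi)
      = match argmax b H with
        | some (m, j) => (some m, s + (j : Int))
        | none => (b, bi) := by
  induction H generalizing s b bi with
  | nil => simp [PySem.List.enumerate_nil, argmax]
  | cons c t ih =>
    rw [PySem.List.enumerate_cons, List.foldl_cons, argmax]
    by_cases hc : (bDigits.contains c && bBetter b c) = true
    · rw [if_pos hc]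
      have hstep : bStep (b, bi) (s, c) = (some c, s) := by simp only [bStep]; rw [if_pos hc]
      rw [hstep, ih]
      cases h : argmax (some c) t with
      | none => simp
      | some p =>
        obtain ⟨m, j⟩ := p
        simp only []
        push_cast
        ring_nf
    · rw [if_neg hc]
      have hstep : bStep (b, bi) (s, c) = (b, bi) := by simp only [bStep]; rw [if_neg hc]
      rw [hstep, ih]
      cases h : argmax b t with
      | none => simp
      | some p =>
        obtain ⟨m, j⟩ := p
        simp only []
        push_cast
        ring_nf

lemma dig_trans : ∀ x ∈ bDigits, ∀ y ∈ bDigits, ∀ z ∈ bDigits,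
    strLt x y = true → strLt y z = true → strLt x z = true := by decide

lemma dig_ne_of_lt : ∀ x ∈ bDigits, ∀ y ∈ bDigits, strLt x y = true → x ≠ y := by decide

lemma better_trans (b : Option String) (hb : b = none ∨ ∃ x, b = some x ∧ x ∈ bDigits)
    (m : String) (hm : m ∈ bDigits) (d : String) (hd : d ∈ bDigits)
    (h1 : bBetter b m = true) (h2 : strLt m d = true) : bBetter b d = true := by
  cases b with
  | none => rfl
  | some x =>
    obtain ⟨y, hy, hyd⟩ := hb.resolve_left (by simp)
    have hxy : x = y := by injection hy
    subst hxy
    exact dig_trans x hyd m hm d hd h1 h2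

-- the winner of Source B's scan is the first occurrence of the largest digit present
lemma argmax_char : ∀ (H : List String) (b : Option String),
    (b = none ∨ ∃ x, b = some x ∧ x ∈ bDigits) →
    ((argmax b H = none → ∀ d ∈ bDigits, bBetter b d = true → d ∉ H) ∧
     (∀ m j, argmax b H = some (m, j) →
        m ∈ bDigits ∧ bBetter b m = true ∧ PySem.List.index? H m = some j ∧
        ∀ d ∈ bDigits, strLt m d = true → d ∉ H)) := by
  intro H
  induction H with
  | nil =>
    intro b _
    constructor
    · intro _ d _ _; simp
    · intro m j h; simp [argmax] at h
  | cons c t ih =>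
    intro b hb
    by_cases hc : (bDigits.contains c && bBetter b c) = true
    · have hcd : c ∈ bDigits := by
        have := (Bool.and_eq_true _ _).mp hc |>.1
        simpa using this
      have hc2 : bBetter b c = true := (Bool.and_eq_true _ _).mp hc |>.2
      have ihc := ih (some c) (Or.inr ⟨c, rfl, hcd⟩)
      cases h : argmax (some c) t with
      | none =>
        have hres : argmax b (c :: t) = some (c, 0) := by rw [argmax, if_pos hc, h]
        constructor
        · intro h0; rw [hres] at h0; exact absurd h0 (by simp)
        · intro m j heq
          have hmj : (c, 0) = (m, j) := Option.some.inj (hres.symm.trans heq)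
          injection hmj with h1 h2
          subst h1; subst h2
          refine ⟨hcd, hc2, PySem.List.index?_cons_self c t, ?_⟩
          intro d hd hlt
          simp only [List.mem_cons, not_or]
          exact ⟨Ne.symm (dig_ne_of_lt c hcd d hd hlt), ihc.1 h d hd hlt⟩
      | some p =>
        obtain ⟨m0, j0⟩ := p
        obtain ⟨hm, hbm, hidx, habs⟩ := ihc.2 m0 j0 h
        have hres : argmax b (c :: t) = some (m0, j0 + 1) := by rw [argmax, if_pos hc, h]
        constructor
        · intro h0; rw [hres] at h0; exact absurd h0 (by simp)
        · intro m j heq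
          have hmj : (m0, j0 + 1) = (m, j) := Option.some.inj (hres.symm.trans heq)
          injection hmj with h1 h2
          subst h1; subst h2
          have hcm : c ≠ m0 := dig_ne_of_lt c hcd m0 hm hbm
          refine ⟨hm, better_trans b hb c hcd m0 hm hc2 hbm, ?_, ?_⟩
          · rw [PySem.List.index?_cons_of_ne t hcm, hidx]; rfl
          · intro d hd hlt
            simp only [List.mem_cons, not_or]
            refine ⟨?_, habs d hd hlt⟩
            intro hdc
            exact dig_ne_of_lt c hcd d hd (dig_trans c hcd m0 hm d hd hbm hlt) hdc.symm
    · have ihb := ih b hb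
      cases h : argmax b t with
      | none =>
        have hres : argmax b (c :: t) = none := by rw [argmax, if_neg hc, h]
        constructor
        · intro _ d hd hbd
          simp only [List.mem_cons, not_or]
          refine ⟨?_, ihb.1 h d hd hbd⟩
          rintro rfl
          exact hc (by simp [hd, hbd])
        · intro m j heq; rw [hres] at heq; exact absurd heq (by simp)
      | some p =>
        obtain ⟨m0, j0⟩ := p
        obtain ⟨hm, hbm, hidx, habs⟩ := ihb.2 m0 j0 h
        have hres : argmax b (c :: t) = some (m0, j0 + 1) := by rw [argmax, if_neg hc, h]
        constructor
        · intro h0; rw [hres] at h0; exact absurd h0 (by simp)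
        · intro m j heq
          have hmj : (m0, j0 + 1) = (m, j) := Option.some.inj (hres.symm.trans heq)
          injection hmj with h1 h2
          subst h1; subst h2
          have hcm : c ≠ m0 := by
            rintro rfl
            exact hc (by simp [hm, hbm])
          refine ⟨hm, hbm, ?_, ?_⟩
          · rw [PySem.List.index?_cons_of_ne t hcm, hidx]; rfl
          · intro d hd hlt
            simp only [List.mem_cons, not_or]
            refine ⟨?_, habs d hd hlt⟩
            rintro rfl
            exact hc (by simp [hd, better_trans b hb m0 hm d hd hbm hlt])

lemma mem_aDigits_iff (x : String) : x ∈ aDigits ↔ x ∈ bDigits := by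
  simp [aDigits, bDigits]; tauto

lemma aDigits_sorted : aDigits.Pairwise (fun a b => strLt b a = true) := by decide

lemma spec_none (H : List String) (n : Int) (ds : List String)
    (h : ∀ d ∈ ds, PySem.List.index? H d = none) : specLoop H n ds = n - 1 := by
  induction ds with
  | nil => rfl
  | cons d rest ih =>
    simp only [specLoop, h d (by simp)]
    exact ih (fun e he => h e (by simp [he]))

lemma spec_finds (H : List String) (n : Int) (ds : List String)
    (hsort : ds.Pairwise (fun a b => strLt b a = true)) (m : String) (hm : m ∈ ds) (j : Nat)
    (hj : PySem.List.index? H m = some j)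
    (habs : ∀ d ∈ ds, strLt m d = true → PySem.List.index? H d = none) :
    specLoop H n ds = (j : Int) := by
  induction ds with
  | nil => cases hm
  | cons d rest ih =>
    by_cases hdm : d = m
    · subst hdm; simp only [specLoop, hj]
    · have hmrest : m ∈ rest := by cases hm with
        | head => exact absurd rfl hdm
        | tail _ h => exact h
      have hmd : strLt m d = true := (List.pairwise_cons.mp hsort).1 m hmrest
      simp only [specLoop, habs d (by simp) hmd]
      exact ih (List.pairwise_cons.mp hsort).2 hmrest
        (fun e he hlt => habs e (by simp [he]) hlt)

lemma A_eq_spec (line : List String) (last_digit : Bool) :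
    get_best_digit line last_digit
      = specLoop (if last_digit then line else line.dropLast) (line.length : Int) aDigits := by
  refine Eq.trans (rfl :
      get_best_digit line last_digit
        = aLoop ((PySem.List.enumerate line).foldl
            (fun d p => if d.contains p.2 then d else d.insert p.2 p.1) PySem.Dict.empty)
            (line.length : Int) last_digit aDigits) ?_
  refine aLoop_eq line last_digit _ (fun k => ?_) aDigits
  rw [fe_get]
  cases PySem.List.index? line k <;> simp [PySem.Dict.get?_empty]

lemma B_eq_spec (line : List String) (last_digit : Bool) :
    get_best_digit_alt line last_digit
      = specLoop (if last_digit then line else line.dropLast) (line.length : Int) aDigits := by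
  have hH : (if last_digit then line else PySem.List.slice line none (some (-1)))
      = (if last_digit then line else line.dropLast) := by
    cases last_digit <;> simp [PySem.List.slice_to_neg_one]
  have hB : get_best_digit_alt line last_digit
      = ((PySem.List.enumerate (if last_digit then line else line.dropLast)).foldl bStep
          (none, (line.length : Int) - 1)).2 := by
    unfold get_best_digit_alt
    rw [hH]
  rw [hB, foldl_bStep]
  have hchar := argmax_char (if last_digit then line else line.dropLast) none (Or.inl rfl)
  cases h : argmax none (if last_digit then line else line.dropLast) with
  | none =>
    simp only []
    refine (spec_none _ _ aDigits (fun d hd => ?_)).symm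
    rw [PySem.List.index?_eq_none_iff]
    exact hchar.1 h d ((mem_aDigits_iff d).mp hd) rfl
  | some p =>
    obtain ⟨m, j⟩ := p
    obtain ⟨hm, -, hidx, habs⟩ := hchar.2 m j h
    simp only []
    rw [spec_finds _ ((line.length : Int)) aDigits aDigits_sorted m
      ((mem_aDigits_iff m).mpr hm) j hidx
      (fun d hd hlt => (PySem.List.index?_eq_none_iff _ _).mpr
        (habs d ((mem_aDigits_iff d).mp hd) hlt))]
    ring_nf

-- ===== VERDICT (by name: the statement is the Claim_ definition above) =====
theorem get_best_digit_spec : Claim_equal_get_best_digit := by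
  intro line last_digit _
  unfold Spec_get_best_digit
  rw [A_eq_spec, B_eq_spec]
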